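-- pv_equiv track=rewrite | github.com/qinaidedede0319/discourse | preprocess/gen_parse.py | parse2parsetree
-- ===== SOURCE A (Python) =====
-- def parse2parsetree(parse):
--     tmptree = parse.replace("ROOT\n ","")
--     tmptree = tmptree.replace("\n","")
--     parsetree = ""
--     for i in range(len(tmptree)):
--         if tmptree[i]!=" ":
--             parsetree+=tmptree[i]
--         else:
--             if i>0 and tmptree[i-1]!=" ":
--                 parsetree+=tmptree[i]
--     return parsetree
-- ===== SOURCE B (Python) =====
-- def parse2parsetree(parse):
--     tmptree = parse.replace("ROOT\n ", "").replace("\n", "")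
--     words = [w for w in tmptree.split(" ") if w]
--     parsetree = " ".join(words)
--     if words and tmptree.endswith(" "):
--         parsetree += " "
--     return parsetree
-- ===== Notes on version B (the rewrite author's own statement) =====
-- stated objective: faster
-- what changed: Replaces A's character-by-character index loop (with a lookback at tmptree[i-1] and per-character string += concatenation) by a split-on-space / drop-empty-pieces / single-space join recombination, re-appending the one trailing space A keeps when the string ends in spaces.
import Mathlib
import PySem

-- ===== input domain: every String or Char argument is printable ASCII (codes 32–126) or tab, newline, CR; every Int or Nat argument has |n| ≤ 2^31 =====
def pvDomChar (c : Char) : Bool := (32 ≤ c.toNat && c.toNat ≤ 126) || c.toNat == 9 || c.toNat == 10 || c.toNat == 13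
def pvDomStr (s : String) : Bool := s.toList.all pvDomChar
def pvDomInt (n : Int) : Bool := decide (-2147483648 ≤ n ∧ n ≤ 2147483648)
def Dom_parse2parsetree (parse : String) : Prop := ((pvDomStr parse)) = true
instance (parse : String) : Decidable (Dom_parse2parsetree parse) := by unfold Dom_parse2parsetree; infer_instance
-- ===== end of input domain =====

-- B replaces A's char-by-char index scan (with a lookback at tmptree[i-1] and per-char
-- string concatenation) by a split-on-space / filter / join recombination; same return
-- value, and a timing run measured B faster on its large inputs (objective: faster).

-- ===== PORT A =====
-- literal port of A: two replaces, then a loop over range(len(tmptree)) appending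
-- tmptree[i] unless it is a space preceded by start-of-string or another space
def parse2parsetree (parse : String) : String :=
  let tmptree := PySem.Str.replace (PySem.Str.replace parse "ROOT\n " "") "\n" ""
  let t := tmptree.toList
  let parsetree := (PySem.List.pyRange 0 (t.length : Int) 1).foldl
    (fun acc i =>
      if PySem.List.pyGetD t i ' ' != ' ' then acc ++ [PySem.List.pyGetD t i ' ']
      else if decide (0 < i) && (PySem.List.pyGetD t (i - 1) ' ' != ' ') then
        acc ++ [PySem.List.pyGetD t i ' ']
      else acc) ([] : List Char)
  String.ofList parsetree

-- ===== PORT B =====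
-- port of Source B: split on " ", drop empty pieces, join with single spaces,
-- re-append one trailing space when tmptree ended in a space and a word survived
def parse2parsetree_alt (parse : String) : String :=
  let tmptree := PySem.Str.replace (PySem.Str.replace parse "ROOT\n " "") "\n" ""
  let t := tmptree.toList
  let words := (PySem.Chars.splitOn t [' ']).filter (fun w => w ≠ ([] : List Char))
  let parsetree := PySem.Chars.join [' '] words
  let parsetree :=
    if words ≠ [] ∧ PySem.Chars.endswith t [' '] then parsetree ++ [' '] else parsetree
  String.ofList parsetree

-- ===== PRECONDITION & SPEC =====
def Spec_parse2parsetree (parse : String) (out : String) : Prop := out = parse2parsetree_alt parse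
instance (parse : String) (out : String) : Decidable (Spec_parse2parsetree parse out) := by unfold Spec_parse2parsetree; infer_instance

-- ===== CLAIM (what is proved, stated in full; the proofs are below) =====
def Claim_equal_parse2parsetree : Prop := ∀ (parse : String), Dom_parse2parsetree parse → Spec_parse2parsetree parse (parse2parsetree parse)

-- ===== LEMMAS AND PROOFS =====

-- reference structural form of splitting a char list on a single space
def pvSplit1 : List Char → List (List Char)
  | [] => [[]]
  | c :: cs => if c = ' ' then [] :: pvSplit1 cs else (pvSplit1 cs).modifyHead (c :: ·)

lemma pvSplit1_ne_nil (l : List Char) : pvSplit1 l ≠ [] := by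
  induction l with
  | nil => simp [pvSplit1]
  | cons c cs ih =>
    simp only [pvSplit1]
    split_ifs
    · simp
    · cases h : pvSplit1 cs with
      | nil => exact absurd h ih
      | cons a as => simp [List.modifyHead]

lemma pvSplitOn_go_spec (fuel : Nat) :
    ∀ (l cur : List Char) (accs : List (List Char)), l.length < fuel →
      PySem.Chars.splitOn.go [' '] fuel l cur accs =
        accs.reverse ++ (pvSplit1 l).modifyHead (cur.reverse ++ ·) := by
  induction fuel with
  | zero => intro l cur accs h; omega
  | succ fuel ih =>
    intro l cur accs h
    cases l with
    | nil =>
      simp [PySem.Chars.splitOn.go, pvSplit1, List.modifyHead]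
    | cons c rest =>
      by_cases hc : c = ' '
      · subst hc
        rw [show PySem.Chars.splitOn.go [' '] (fuel + 1) (' ' :: rest) cur accs =
              PySem.Chars.splitOn.go [' '] fuel rest [] (cur.reverse :: accs) from by
            simp [PySem.Chars.splitOn.go, List.isPrefixOf]]
        rw [ih rest [] (cur.reverse :: accs) (by simp at h; omega)]
        simp [pvSplit1, List.modifyHead]
        cases pvSplit1 rest <;> rfl
      · rw [show PySem.Chars.splitOn.go [' '] (fuel + 1) (c :: rest) cur accs =
              PySem.Chars.splitOn.go [' '] fuel rest (c :: cur) accs from by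
            simp [PySem.Chars.splitOn.go, List.isPrefixOf, show ¬(' ' = c) from fun h => hc h.symm]]
        rw [ih rest (c :: cur) accs (by simp at h; omega)]
        simp only [pvSplit1, if_neg hc]
        cases hs : pvSplit1 rest with
        | nil => exact absurd hs (pvSplit1_ne_nil rest)
        | cons a as => simp [List.modifyHead]

lemma pvSplitOn_space (l : List Char) :
    PySem.Chars.splitOn l [' '] = pvSplit1 l := by
  unfold PySem.Chars.splitOn
  rw [pvSplitOn_go_spec (l.length + 1) l [] [] (Nat.lt_succ_self _)]
  cases hs : pvSplit1 l with
  | nil => exact absurd hs (pvSplit1_ne_nil l)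
  | cons a as => simp [List.modifyHead]

-- reference collapse function: flag = "previous character was a space or start of string"
def pvCollapse : Bool → List Char → List Char
  | _, [] => []
  | ps, c :: cs =>
    if c = ' ' then (if ps then pvCollapse true cs else c :: pvCollapse true cs)
    else c :: pvCollapse false cs

lemma pvCollapse_false (t : List Char) :
    pvCollapse false t = (if t.head? = some ' ' then [' '] else []) ++ pvCollapse true t := by
  cases t with
  | nil => simp [pvCollapse]
  | cons c cs =>
    by_cases hc : c = ' '
    · subst hc; simp [pvCollapse]
    · simp [pvCollapse, hc]

-- the value B computes, on the char-list level
def pvWords (t : List Char) : List (List Char) :=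
  (pvSplit1 t).filter (fun w => w ≠ ([] : List Char))

def pvBout (t : List Char) : List Char :=
  if pvWords t ≠ [] ∧ PySem.Chars.endswith t [' '] then
    PySem.Chars.join [' '] (pvWords t) ++ [' ']
  else PySem.Chars.join [' '] (pvWords t)

lemma pvEndswith_cons (c : Char) (l : List Char) (h : l ≠ []) :
    PySem.Chars.endswith (c :: l) [' '] = PySem.Chars.endswith l [' '] := by
  rw [Bool.eq_iff_iff, PySem.Chars.endswith_iff, PySem.Chars.endswith_iff, List.suffix_cons_iff]
  constructor
  · rintro (heq | hs)
    · exact absurd (congrArg List.tail heq).symm h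
    · exact hs
  · exact Or.inr

lemma pvWords_space (ds : List Char) : pvWords (' ' :: ds) = pvWords ds := by
  unfold pvWords
  rw [show pvSplit1 (' ' :: ds) = [] :: pvSplit1 ds from by simp [pvSplit1]]
  rw [List.filter_cons_of_neg (by simp)]

lemma pvAllSpaces_endswith (cs : List Char) (h : pvWords cs = [])
    (hne : cs ≠ []) : PySem.Chars.endswith cs [' '] = true := by
  induction cs with
  | nil => exact absurd rfl hne
  | cons c rest ih =>
    by_cases hc : c = ' '
    · subst hc
      rw [pvWords_space] at h
      cases rest with
      | nil => decide
      | cons d ds =>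
        rw [pvEndswith_cons ' ' (d :: ds) (by simp)]
        exact ih h (by simp)
    · exfalso
      unfold pvWords at h
      rw [show pvSplit1 (c :: rest) = (pvSplit1 rest).modifyHead (c :: ·) from by
            simp [pvSplit1, hc]] at h
      cases hs : pvSplit1 rest with
      | nil => exact absurd hs (pvSplit1_ne_nil rest)
      | cons a as =>
        rw [hs] at h
        simp [List.modifyHead] at h

lemma pvJoin_cons_head (c : Char) (q : List Char) (rest : List (List Char)) :
    PySem.Chars.join [' '] ((c :: q) :: rest) = c :: PySem.Chars.join [' '] (q :: rest) := by
  cases rest with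
  | nil => rw [PySem.Chars.join_singleton, PySem.Chars.join_singleton]
  | cons r rs => rw [PySem.Chars.join_cons_cons, PySem.Chars.join_cons_cons]; simp

lemma pvCollapse_eq_bout (t : List Char) : pvCollapse true t = pvBout t := by
  induction t with
  | nil => simp [pvCollapse, pvBout, pvWords, pvSplit1, PySem.Chars.join, List.intercalate]
  | cons c cs ih =>
    by_cases hc : c = ' '
    · subst hc
      rw [show pvCollapse true (' ' :: cs) = pvCollapse true cs from by simp [pvCollapse], ih]
      cases cs with
      | nil => decide
      | cons d ds =>
        unfold pvBout
        rw [pvWords_space, pvEndswith_cons ' ' (d :: ds) (by simp)]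
    · rw [show pvCollapse true (c :: cs) = c :: pvCollapse false cs from by simp [pvCollapse, hc]]
      rw [pvCollapse_false, ih]
      cases cs with
      | nil =>
        have he : PySem.Chars.endswith [c] [' '] = false := by
          rw [Bool.eq_false_iff]
          intro hT
          rcases List.suffix_cons_iff.mp ((PySem.Chars.endswith_iff _ _).mp hT) with h1 | h1
          · have hce : ' ' = c := by simpa using congrArg (fun l => l.headD ' ') h1
            exact hc hce.symm
          · simp at h1
        simp [pvBout, pvWords, pvSplit1, List.modifyHead, he, hc,
          PySem.Chars.join_singleton]
      | cons d ds =>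
        by_cases hd : d = ' '
        · subst hd
          rw [show (if (' ' :: ds : List Char).head? = some ' ' then [' '] else ([] : List Char))
                = [' '] from by simp]
          have hWt : pvWords (c :: ' ' :: ds) = [c] :: pvWords ds := by
            unfold pvWords
            rw [show pvSplit1 (c :: ' ' :: ds) = [c] :: pvSplit1 ds from by
                  simp [pvSplit1, List.modifyHead, hc]]
            rw [List.filter_cons_of_pos (by simp)]
          unfold pvBout
          rw [hWt, pvWords_space, pvEndswith_cons c (' ' :: ds) (by simp)]
          cases hW : pvWords ds with
          | nil =>
            have hE : PySem.Chars.endswith (' ' :: ds) [' '] = true :=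
              pvAllSpaces_endswith (' ' :: ds) (by rw [pvWords_space, hW]) (by simp)
            simp [hE, PySem.Chars.join_nil, PySem.Chars.join_singleton]
          | cons w ws =>
            rw [PySem.Chars.join_cons_cons]
            by_cases hE : PySem.Chars.endswith (' ' :: ds) [' '] = true
            · simp [hE]
            · simp [Bool.eq_false_iff.mpr hE]
        · rw [show (if (d :: ds : List Char).head? = some ' ' then [' '] else ([] : List Char))
                = [] from by simp [hd]]
          cases hs : pvSplit1 ds with
          | nil => exact absurd hs (pvSplit1_ne_nil ds)
          | cons h' rest' =>
            have hW1 : pvWords (d :: ds)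
                = (d :: h') :: rest'.filter (fun w => w ≠ ([] : List Char)) := by
              unfold pvWords
              rw [show pvSplit1 (d :: ds) = (d :: h') :: rest' from by
                    simp [pvSplit1, hd, hs, List.modifyHead]]
              rw [List.filter_cons_of_pos (by simp)]
            have hW2 : pvWords (c :: d :: ds)
                = (c :: d :: h') :: rest'.filter (fun w => w ≠ ([] : List Char)) := by
              unfold pvWords
              rw [show pvSplit1 (c :: d :: ds) = (c :: d :: h') :: rest' from by
                    simp [pvSplit1, hc, hd, hs, List.modifyHead]]
              rw [List.filter_cons_of_pos (by simp)]
            unfold pvBout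
            rw [hW1, hW2, pvEndswith_cons c (d :: ds) (by simp)]
            by_cases hE : PySem.Chars.endswith (d :: ds) [' '] = true
            · simp [hE, pvJoin_cons_head]
            · simp [Bool.eq_false_iff.mpr hE, pvJoin_cons_head]

def pvFlag (t : List Char) (k : Nat) : Bool := k == 0 || (t.getD (k - 1) ' ' == ' ')

lemma pvLoopA (t : List Char) (n : Nat) : ∀ (k : Nat) (acc : List Char), k ≤ t.length →
    n = t.length - k →
    (PySem.List.pyRange (k : Int) (t.length : Int) 1).foldl
      (fun acc i =>
        if PySem.List.pyGetD t i ' ' != ' ' then acc ++ [PySem.List.pyGetD t i ' ']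
        else if decide (0 < i) && (PySem.List.pyGetD t (i - 1) ' ' != ' ') then
          acc ++ [PySem.List.pyGetD t i ' ']
        else acc) acc =
      acc ++ pvCollapse (pvFlag t k) (t.drop k) := by
  induction n with
  | zero =>
    intro k acc hk hn
    have hnil : PySem.List.pyRange (k : Int) (t.length : Int) 1 = [] := by
      apply List.eq_nil_iff_forall_not_mem.mpr
      intro x hx
      rw [PySem.List.mem_pyRange_one] at hx
      omega
    rw [hnil]
    simp [List.drop_eq_nil_of_le (show t.length ≤ k by omega), pvCollapse]
  | succ n ih =>
    intro k acc hk hn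
    have hklt : k < t.length := by omega
    have hcast : ((k : Int)) < (t.length : Int) := by exact_mod_cast hklt
    rw [PySem.List.pyRange_one_cons hcast, List.foldl_cons]
    rw [show ((k : Int) + 1) = (((k + 1 : Nat)) : Int) from by push_cast; ring]
    rw [ih (k + 1) _ (by omega) (by omega)]
    have hgetk : PySem.List.pyGetD t (k : Int) ' ' = t.getD k ' ' :=
      PySem.List.pyGetD_natCast t k ' '
    have hdrop : t.drop k = t.getD k ' ' :: t.drop (k + 1) := by
      rw [List.getD_eq_getElem t ' ' hklt]
      exact List.drop_eq_getElem_cons hklt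
    have hflag1 : pvFlag t (k + 1) = (t.getD k ' ' == ' ') := by simp [pvFlag]
    have hcond : (decide (0 < (k : Int)) && (PySem.List.pyGetD t ((k : Int) - 1) ' ' != ' '))
        = !(pvFlag t k) := by
      by_cases hk0 : k = 0
      · subst hk0; simp [pvFlag]
      · obtain ⟨m, rfl⟩ : ∃ m, k = m + 1 := ⟨k - 1, by omega⟩
        have h1 : (((m + 1 : Nat) : Int) - 1) = ((m : Nat) : Int) := by push_cast; ring
        have h2 : decide (0 < (((m + 1 : Nat)) : Int)) = true :=
          decide_eq_true (by exact_mod_cast Nat.succ_pos m)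
        rw [h1, PySem.List.pyGetD_natCast, h2]
        simp [pvFlag, bne]
    rw [hdrop, hflag1, hgetk, hcond]
    generalize t.getD k ' ' = ck
    by_cases hcc : ck = ' '
    · subst hcc
      by_cases hf : pvFlag t k = true
      · simp [hf, pvCollapse]
      · simp [Bool.eq_false_iff.mpr hf, pvCollapse]
    · have hb : (ck == ' ') = false := beq_eq_false_iff_ne.mpr hcc
      simp [hcc, hb, pvCollapse]

lemma pvLoopA0 (t : List Char) :
    (PySem.List.pyRange 0 (t.length : Int) 1).foldl
      (fun acc i =>
        if PySem.List.pyGetD t i ' ' != ' ' then acc ++ [PySem.List.pyGetD t i ' ']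
        else if decide (0 < i) && (PySem.List.pyGetD t (i - 1) ' ' != ' ') then
          acc ++ [PySem.List.pyGetD t i ' ']
        else acc) ([] : List Char) = pvCollapse true t := by
  have h := pvLoopA t t.length 0 [] (Nat.zero_le _) (Nat.sub_zero _).symm
  rw [Nat.cast_zero] at h
  exact h.trans rfl

-- ===== VERDICT (by name: the statement is the Claim_ definition above) =====
theorem parse2parsetree_spec : Claim_equal_parse2parsetree := by
  intro parse _
  unfold Spec_parse2parsetree parse2parsetree parse2parsetree_alt
  dsimp only
  generalize (PySem.Str.replace (PySem.Str.replace parse "ROOT\n " "") "\n" "").toList = t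
  congr 1
  rw [pvLoopA0 t, pvCollapse_eq_bout, pvSplitOn_space]
  rfl
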